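-- pv_equiv track=rewrite | github.com/Chrisharnett/DailyShed | backend/python_scripts/exerciseCollections/rhythmPatternCollections.py | rhythmPatternNoteLength
-- ===== SOURCE A (Python) =====
-- def rhythmPatternNoteLength(rhythmPattern):
--     count = 0
--     for r in rhythmPattern:
--         for n in r:
--             if isinstance(n, int) or n.isdigit():
--                 count += 1
--     n = sum(sublist.count("~") for sublist in rhythmPattern)
--     count -= n
--     return count
-- ===== SOURCE B (Python) =====
-- def _delta(n):
--     if isinstance(n, int) or n.isdigit():
--         return 1
--     return -1 if n == "~" else 0
--
-- def rhythmPatternNoteLength(rhythmPattern):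
--     return sum(_delta(n) for r in rhythmPattern for n in r)
-- ===== Notes on version B (the rewrite author's own statement) =====
-- stated objective: simpler
-- what changed: Replaces A's nested counting loop plus a separate per-sublist '~'-count pass with a single flattened sum of a per-token delta (+1 digit, -1 tilde, 0 otherwise).
import Mathlib
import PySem

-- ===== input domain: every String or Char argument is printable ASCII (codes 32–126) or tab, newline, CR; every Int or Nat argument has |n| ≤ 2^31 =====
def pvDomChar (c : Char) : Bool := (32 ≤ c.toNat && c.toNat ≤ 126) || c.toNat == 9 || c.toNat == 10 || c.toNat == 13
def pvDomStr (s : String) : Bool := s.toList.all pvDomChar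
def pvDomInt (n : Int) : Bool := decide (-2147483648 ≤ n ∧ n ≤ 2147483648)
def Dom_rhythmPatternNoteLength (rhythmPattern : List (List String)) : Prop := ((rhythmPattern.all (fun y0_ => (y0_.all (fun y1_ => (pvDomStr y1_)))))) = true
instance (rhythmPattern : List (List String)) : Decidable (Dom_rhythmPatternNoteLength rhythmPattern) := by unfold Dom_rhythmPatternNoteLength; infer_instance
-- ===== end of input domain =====

-- B replaces A's nested count-then-subtract two-pass with a single flattened sum of a per-token delta (simpler decomposition, same O(n) cost).
-- ===== PORT A =====
-- Port of A: nested loop counting digit tokens (isinstance(n,int) is always False for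
-- the String elements of this type, so the 'or' reduces to n.isdigit()), then a second
-- pass subtracting the per-sublist list.count("~").
def rhythmPatternNoteLength (rhythmPattern : List (List String)) : Int :=
  let count : Int :=
    rhythmPattern.foldl (fun c r =>
      r.foldl (fun c n => if PySem.Str.strIsdigit n then c + 1 else c) c) 0
  let n : Int := (rhythmPattern.map (fun sublist => (PySem.List.count sublist "~" : Int))).sum
  count - n

-- ===== PORT B =====
def pvDelta (n : String) : Int :=
  if PySem.Str.strIsdigit n then 1 else if n == "~" then -1 else 0

-- B: one flattened pass summing a per-token delta.
def rhythmPatternNoteLength_alt (rhythmPattern : List (List String)) : Int :=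
  ((rhythmPattern.flatMap (fun r => r)).map pvDelta).sum

-- ===== PRECONDITION & SPEC =====
def Spec_rhythmPatternNoteLength (rhythmPattern : List (List String)) (out : Int) : Prop := out = rhythmPatternNoteLength_alt rhythmPattern
instance (rhythmPattern : List (List String)) (out : Int) : Decidable (Spec_rhythmPatternNoteLength rhythmPattern out) := by unfold Spec_rhythmPatternNoteLength; infer_instance

-- ===== CLAIM (what is proved, stated in full; the proofs are below) =====
def Claim_equal_rhythmPatternNoteLength : Prop := ∀ (rhythmPattern : List (List String)), Dom_rhythmPatternNoteLength rhythmPattern → Spec_rhythmPatternNoteLength rhythmPattern (rhythmPatternNoteLength rhythmPattern)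

-- ===== LEMMAS AND PROOFS =====

lemma inner_fold (r : List String) (c : Int) :
    r.foldl (fun c n => if PySem.Str.strIsdigit n then c + 1 else c) c
      = c + (r.map (fun n => if PySem.Str.strIsdigit n then (1:Int) else 0)).sum := by
  induction r generalizing c with
  | nil => simp
  | cons h t ih => rw [List.foldl_cons, ih]; simp only [List.map_cons, List.sum_cons]; split <;> ring

lemma outer_fold (t : List (List String)) (c : Int) :
    t.foldl (fun c r =>
        r.foldl (fun c n => if PySem.Str.strIsdigit n then c + 1 else c) c) c
      = c + (t.map (fun r =>
          (r.map (fun n => if PySem.Str.strIsdigit n then (1:Int) else 0)).sum)).sum := by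
  induction t generalizing c with
  | nil => simp
  | cons h tl ih => rw [List.foldl_cons, ih, inner_fold]; simp; ring

lemma count_tilde (r : List String) :
    (PySem.List.count r "~" : Int)
      = (r.map (fun n => if n == "~" then (1:Int) else 0)).sum := by
  induction r with
  | nil => simp [PySem.List.count]
  | cons h t ih =>
    by_cases hh : h = "~" <;>
      simp [PySem.List.count, hh] at ih ⊢ <;> omega

lemma delta_eq (n : String) :
    pvDelta n = (if PySem.Str.strIsdigit n then (1:Int) else 0)
                - (if n == "~" then (1:Int) else 0) := by
  by_cases h : n = "~"
  · subst h; decide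
  · simp [pvDelta, h]

lemma delta_sum (l : List String) :
    (l.map pvDelta).sum
      = (l.map (fun n => if PySem.Str.strIsdigit n then (1:Int) else 0)).sum
        - (l.map (fun n => if n == "~" then (1:Int) else 0)).sum := by
  induction l with
  | nil => simp
  | cons a b ih => simp [delta_eq a, ih]; ring

lemma sum_map_sub (t : List (List String)) (f g : List String → Int) :
    (t.map (fun r => f r - g r)).sum = (t.map f).sum - (t.map g).sum := by
  induction t with
  | nil => simp
  | cons h tl ih => simp [ih]; ring

-- ===== VERDICT =====
theorem rhythmPatternNoteLength_spec : Claim_equal_rhythmPatternNoteLength := by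
  intro rp _
  unfold Spec_rhythmPatternNoteLength rhythmPatternNoteLength rhythmPatternNoteLength_alt
  rw [outer_fold]
  simp only [List.map_flatten, List.sum_flatten, List.flatMap, List.map_map,
    Function.comp_def, count_tilde, delta_sum]
  rw [sum_map_sub]
  ring
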